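-- pv_equiv track=rewrite | github.com/JSinks/udacity-analyst-machine-learning | poi_id.py | find_features_with_no_data
-- ===== SOURCE A (Python) =====
-- def find_features_with_no_data(scan_data, feature_list):
--     no_data_features = []
--     for feature in feature_list:
--         non_NaN = False
--         for ppl, features in scan_data.items():
--             try:
--                 if features[feature] != 'NaN':
--                     non_NaN = True
--                     break
--             except KeyError:
--                 pass
--
--         if not non_NaN:
--             no_data_features.append(feature)
--
--     return no_data_features
-- ===== SOURCE B (Python) =====
-- def find_features_with_no_data(scan_data, feature_list):
--     has_data = set()
--     for ppl, features in scan_data.items():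
--         for feature, value in features.items():
--             if value != 'NaN':
--                 has_data.add(feature)
--     return [f for f in feature_list if f not in has_data]
-- ===== Notes on version B (the rewrite author's own statement) =====
-- stated objective: faster
-- what changed: Inverts the traversal: instead of scanning all people once per feature with per-feature dict lookups, B makes one pass over scan_data building a has-data set of feature keys, then filters feature_list by set membership.
import Mathlib
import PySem

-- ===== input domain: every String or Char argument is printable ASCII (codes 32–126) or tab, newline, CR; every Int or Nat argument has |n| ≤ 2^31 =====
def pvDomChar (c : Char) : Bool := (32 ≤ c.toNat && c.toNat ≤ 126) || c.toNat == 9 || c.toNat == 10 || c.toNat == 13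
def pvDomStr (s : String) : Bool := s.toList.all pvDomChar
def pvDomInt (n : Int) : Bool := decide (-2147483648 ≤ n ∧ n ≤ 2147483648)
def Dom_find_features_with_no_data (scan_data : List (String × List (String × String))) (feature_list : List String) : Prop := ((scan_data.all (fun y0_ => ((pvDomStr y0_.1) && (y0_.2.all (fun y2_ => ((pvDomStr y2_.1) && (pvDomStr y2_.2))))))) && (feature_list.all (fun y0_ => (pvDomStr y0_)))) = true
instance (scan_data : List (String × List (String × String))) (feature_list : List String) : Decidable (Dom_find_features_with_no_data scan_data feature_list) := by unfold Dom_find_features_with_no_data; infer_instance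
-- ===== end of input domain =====

-- B builds a has-data set in one pass over scan_data then filters feature_list, instead of
-- A's per-feature rescan of all people (objective: faster, asymptotic).


-- ===== PORT A =====
-- inner 'for ppl, features in scan_data.items()' loop with break: sets non_NaN on the first
-- person whose dict holds the feature with a value != 'NaN' (KeyError → pass = no match)
def find_features_with_no_data (scan_data : List (String × List (String × String))) (feature_list : List String) : List String :=
  feature_list.foldl (fun no_data_features feature =>
    let non_NaN := scan_data.any (fun p =>
      match p.2.lookup feature with   -- features[feature]; none = KeyError, passed over
      | some v => v ≠ "NaN"
      | none => false)
    if !non_NaN then no_data_features ++ [feature] else no_data_features) []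

-- ===== PORT B =====
def find_features_with_no_data_alt (scan_data : List (String × List (String × String))) (feature_list : List String) : List String :=
  let has_data : PySem.Set String := scan_data.foldl (fun s p =>
    p.2.foldl (fun s kv => if kv.2 ≠ "NaN" then PySem.Set.add s kv.1 else s) s) PySem.Set.empty
  feature_list.filter (fun f => !(PySem.Set.contains has_data f))

-- ===== PRECONDITION & SPEC =====
-- Pre_ excludes association lists in which one person's feature dict carries a duplicate key:
-- a Python dict cannot contain duplicate keys, so such lists represent no Python input.
def Pre_find_features_with_no_data (scan_data : List (String × List (String × String))) (feature_list : List String) : Prop :=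
  ∀ p ∈ scan_data, (p.2.map Prod.fst).Nodup
instance (scan_data : List (String × List (String × String))) (feature_list : List String) : Decidable (Pre_find_features_with_no_data scan_data feature_list) := by unfold Pre_find_features_with_no_data; infer_instance

def pvWitness_find_features_with_no_data : (List (String × List (String × String))) × List String :=
  ([("alice", [("f1", "NaN"), ("f2", "3")])], ["f1", "f2", "f3"])

def Spec_find_features_with_no_data (scan_data : List (String × List (String × String))) (feature_list : List String) (out : List String) : Prop := out = find_features_with_no_data_alt scan_data feature_list
instance (scan_data : List (String × List (String × String))) (feature_list : List String) (out : List String) : Decidable (Spec_find_features_with_no_data scan_data feature_list out) := by unfold Spec_find_features_with_no_data; infer_instance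

-- ===== CLAIM (what is proved, stated in full; the proofs are below) =====
def Claim_equal_find_features_with_no_data : Prop := ∀ (scan_data : List (String × List (String × String))) (feature_list : List String), Dom_find_features_with_no_data scan_data feature_list → Pre_find_features_with_no_data scan_data feature_list → Spec_find_features_with_no_data scan_data feature_list (find_features_with_no_data scan_data feature_list)

-- ===== LEMMAS AND PROOFS =====

-- membership in B's inner fold over one person's pairs
theorem mem_inner_fold (l : List (String × String)) (s : PySem.Set String) (y : String) :
    y ∈ l.foldl (fun s kv => if kv.2 ≠ "NaN" then PySem.Set.add s kv.1 else s) s ↔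
      y ∈ s ∨ ∃ kv ∈ l, kv.1 = y ∧ kv.2 ≠ "NaN" := by
  induction l generalizing s with
  | nil => simp
  | cons kv t ih =>
    simp only [List.foldl_cons, ih]
    by_cases h : kv.2 = "NaN" <;> simp [h, PySem.Set.mem_add] <;> tauto

-- membership in B's has_data set
theorem mem_outer_fold (sd : List (String × List (String × String))) (s : PySem.Set String) (y : String) :
    y ∈ sd.foldl (fun s p =>
        p.2.foldl (fun s kv => if kv.2 ≠ "NaN" then PySem.Set.add s kv.1 else s) s) s ↔
      y ∈ s ∨ ∃ p ∈ sd, ∃ kv ∈ p.2, kv.1 = y ∧ kv.2 ≠ "NaN" := by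
  induction sd generalizing s with
  | nil => simp
  | cons p t ih =>
    simp only [List.foldl_cons, ih, mem_inner_fold]
    constructor
    · rintro ((h | h) | ⟨q, hq, h⟩)
      · exact Or.inl h
      · exact Or.inr ⟨p, List.mem_cons_self, h⟩
      · exact Or.inr ⟨q, List.mem_cons_of_mem _ hq, h⟩
    · rintro (h | ⟨q, hq, h⟩)
      · exact Or.inl (Or.inl h)
      · rcases List.mem_cons.mp hq with rfl | hq
        · exact Or.inl (Or.inr h)
        · exact Or.inr ⟨q, hq, h⟩

-- under unique keys, A's first-match lookup test agrees with "some pair with this key is non-NaN"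
theorem lookup_non_nan (l : List (String × String)) (y : String) (hnd : (l.map Prod.fst).Nodup) :
    (match l.lookup y with
      | some v => v ≠ "NaN"
      | none => false) = true ↔ ∃ kv ∈ l, kv.1 = y ∧ kv.2 ≠ "NaN" := by
  induction l with
  | nil => simp [List.lookup]
  | cons kv t ih =>
    simp only [List.map_cons, List.nodup_cons] at hnd
    by_cases h : y = kv.1
    · have hbeq : (y == kv.1) = true := by simpa using h
      simp only [List.lookup, hbeq]
      constructor
      · intro hv
        exact ⟨kv, List.mem_cons_self, h.symm, by simpa using hv⟩
      · rintro ⟨q, hq, h1, h2⟩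
        rcases List.mem_cons.mp hq with rfl | hq
        · simpa using h2
        · exact absurd (List.mem_map.mpr ⟨q, hq, h1.trans h⟩) hnd.1
    · have hbeq : (y == kv.1) = false := by simpa using h
      simp only [List.lookup, hbeq]
      rw [ih hnd.2]
      constructor
      · rintro ⟨q, hq, h1, h2⟩
        exact ⟨q, List.mem_cons_of_mem _ hq, h1, h2⟩
      · rintro ⟨q, hq, h1, h2⟩
        rcases List.mem_cons.mp hq with rfl | hq
        · exact absurd h1.symm h
        · exact ⟨q, hq, h1, h2⟩

-- ===== VERDICT (by name: the statement is the Claim_ definition above) =====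
theorem find_features_with_no_data_spec : Claim_equal_find_features_with_no_data := by
  intro scan_data feature_list _ hpre
  unfold Spec_find_features_with_no_data find_features_with_no_data find_features_with_no_data_alt
  rw [PySem.List.foldl_append_if_eq_filter
    (p := fun feature => !(scan_data.any (fun p =>
      match p.2.lookup feature with
      | some v => decide (v ≠ "NaN")
      | none => false)))]
  simp only [List.nil_append]
  apply List.filter_congr
  intro f _
  congr 1
  rw [Bool.eq_iff_iff, List.any_eq_true, PySem.Set.contains_iff, mem_outer_fold]
  simp only [PySem.Set.empty]
  constructor
  · rintro ⟨p, hp, hv⟩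
    exact Or.inr ⟨p, hp, (lookup_non_nan p.2 f (hpre p hp)).mp hv⟩
  · rintro (h | ⟨p, hp, hkv⟩)
    · simp at h
    · exact ⟨p, hp, (lookup_non_nan p.2 f (hpre p hp)).mpr hkv⟩
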